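-- pv_equiv track=rewrite | github.com/LimJih00n/CODE_TEST | 250411/메두사와 전사들/medusa-and-warriors.py | make_first_seen
-- ===== SOURCE A (Python) =====
-- import  collections
--
-- def check_B(r,c,N):
--     if r>=0 and c>=0 and r<N and c<N:
--         return True
--     return False
--
-- def make_first_seen(seen_dir,N,r,c):
--     seen_dir_list = [
--         [(-1,-1),(-1,0),(-1,1) ], #상
--         [(1, -1), (1, 0), (1, 1)],  # 하
--         [(1, -1), (0, -1), (-1, -1)],  # 좌
--         [(1,1), (0,1) ,(-1,1)], # 우
--
--
--     ]
--     seen_area = []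
--     visted = set()
--     queue = collections.deque()
--     cur_r,cur_c = r,c
--     for i in range(3):
--         new_r, new_c = cur_r + seen_dir_list[seen_dir][i][0], cur_c + seen_dir_list[seen_dir][i][1]
--         if check_B(new_r, new_c, N):
--             queue.append((new_r,new_c))
--             visted.add((new_r,new_c))
--             seen_area.append((new_r,new_c))
--
--     while queue:
--         cur_r,cur_c = queue.popleft()
--         for i in range(3):
--             new_r,new_c = cur_r+seen_dir_list[seen_dir][i][0],cur_c+seen_dir_list[seen_dir][i][1]
--             if check_B(new_r,new_c,N) and (new_r,new_c) not in visted: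
--                 queue.append((new_r,new_c))
--                 seen_area.append((new_r,new_c))
--                 visted.add((new_r,new_c))
--     return seen_area
-- ===== SOURCE B (Python) =====
-- def make_first_seen(seen_dir, N, r, c):
--     # direct geometric enumeration of the fan, no queue/visited set needed
--     dr, dc = [(-1, 0), (1, 0), (0, -1), (0, 1)][seen_dir]
--     out = []
--     d = 1
--     while True:
--         if dc == 0:
--             row = r + dr * d
--             lo, hi = max(0, c - d), min(N - 1, c + d)
--             if not (0 <= row < N and lo <= hi):
--                 return out
--             out += [(row, col) for col in range(lo, hi + 1)]
--         else:
--             col = c + dc * d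
--             lo, hi = max(0, r - d), min(N - 1, r + d)
--             if not (0 <= col < N and lo <= hi):
--                 return out
--             out += [(row, col) for row in range(hi, lo - 1, -1)]
--         d += 1
-- ===== Notes on version B (the rewrite author's own statement) =====
-- stated objective: simpler
-- what changed: Replaces the BFS (deque + visited set + per-cell membership tests) by a direct geometric enumeration: for each distance d the visible level is a clipped contiguous interval of the perpendicular coordinate, emitted in the exact order the BFS discovers it (ascending columns for up/down, descending rows for left/right), so no queue or set is needed.
import Mathlib
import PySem

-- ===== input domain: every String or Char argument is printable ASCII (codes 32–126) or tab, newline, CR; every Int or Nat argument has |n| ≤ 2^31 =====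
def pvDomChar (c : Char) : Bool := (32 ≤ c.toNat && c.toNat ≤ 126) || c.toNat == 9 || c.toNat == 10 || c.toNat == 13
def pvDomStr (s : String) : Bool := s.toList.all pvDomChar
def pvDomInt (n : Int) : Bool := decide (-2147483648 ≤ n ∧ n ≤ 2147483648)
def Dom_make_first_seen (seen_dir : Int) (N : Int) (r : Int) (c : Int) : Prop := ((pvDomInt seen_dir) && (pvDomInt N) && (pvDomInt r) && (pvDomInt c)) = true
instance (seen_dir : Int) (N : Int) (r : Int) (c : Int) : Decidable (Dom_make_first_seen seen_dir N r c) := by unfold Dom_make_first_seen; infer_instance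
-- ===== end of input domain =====

-- B replaces A's BFS (queue + visited set) by a direct per-distance enumeration of the fan region; objective: simpler.

-- ===== PORT A =====
def check_B (r : Int) (c : Int) (N : Int) : Bool :=
  if 0 ≤ r ∧ 0 ≤ c ∧ r < N ∧ c < N then true else false

def pvSeenDirList : List (List (Int × Int)) :=
  [[(-1,-1),(-1,0),(-1,1)], [(1,-1),(1,0),(1,1)], [(1,-1),(0,-1),(-1,-1)], [(1,1),(0,1),(-1,1)]]

-- one iteration of the seeding 'for i in range(3)' loop (no visited test, per A's code)
def seedStep (moves : List (Int × Int)) (N cr cc : Int)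
    (st : List (Int × Int) × PySem.Set (Int × Int) × List (Int × Int)) (i : Int) :
    List (Int × Int) × PySem.Set (Int × Int) × List (Int × Int) :=
  let mv := (PySem.List.pyGet? moves i).getD (0, 0)
  let nr := cr + mv.1
  let nc := cc + mv.2
  if check_B nr nc N then (st.1 ++ [(nr, nc)], PySem.Set.add st.2.1 (nr, nc), st.2.2 ++ [(nr, nc)])
  else st

-- one iteration of the inner 'for i in range(3)' loop of the while-loop
def bfsStep (moves : List (Int × Int)) (N cr cc : Int)
    (st : List (Int × Int) × PySem.Set (Int × Int) × List (Int × Int)) (i : Int) :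
    List (Int × Int) × PySem.Set (Int × Int) × List (Int × Int) :=
  let mv := (PySem.List.pyGet? moves i).getD (0, 0)
  let nr := cr + mv.1
  let nc := cc + mv.2
  if check_B nr nc N && !(PySem.Set.contains st.2.1 (nr, nc)) then
    (st.1 ++ [(nr, nc)], PySem.Set.add st.2.1 (nr, nc), st.2.2 ++ [(nr, nc)])
  else st

-- the 'while queue' loop; fuel only makes the recursion total (the queue holds distinct
-- in-grid cells, so at most N^2 cells are ever popped and the fuel is never exhausted)
def bfsRun (moves : List (Int × Int)) (N : Int) :
    Nat → List (Int × Int) → PySem.Set (Int × Int) → List (Int × Int) → List (Int × Int)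
  | 0, _, _, seen => seen
  | _ + 1, [], _, seen => seen
  | fuel + 1, cur :: q, vis, seen =>
      let st := (PySem.List.pyRange 0 3 1).foldl (bfsStep moves N cur.1 cur.2) (q, vis, seen)
      bfsRun moves N fuel st.1 st.2.1 st.2.2

def bfsAll (moves : List (Int × Int)) (N r c : Int) : List (Int × Int) :=
  let st := (PySem.List.pyRange 0 3 1).foldl (seedStep moves N r c) ([], [], [])
  bfsRun moves N (N.toNat * N.toNat + N.toNat + 1) st.1 st.2.1 st.2.2

def make_first_seen (seen_dir : Int) (N : Int) (r : Int) (c : Int) : List (Int × Int) :=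
  bfsAll ((PySem.List.pyGet? pvSeenDirList seen_dir).getD []) N r c

-- ===== PORT B =====
-- the 'while True: ... d += 1' loop of Source B; fuel only makes it total (the loop exits
-- once the level leaves the board, after at most N + |r| + |c| + 1 rounds)
def fanGo (dr dc N r c : Int) : Nat → Int → List (Int × Int) → List (Int × Int)
  | 0, _, out => out
  | fuel + 1, d, out =>
      if dc == 0 then
        let row := r + dr * d
        let lo := max 0 (c - d)
        let hi := min (N - 1) (c + d)
        if 0 ≤ row ∧ row < N ∧ lo ≤ hi then
          fanGo dr dc N r c fuel (d + 1) (out ++ (PySem.List.pyRange lo (hi + 1) 1).map (fun col => (row, col)))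
        else out
      else
        let col := c + dc * d
        let lo := max 0 (r - d)
        let hi := min (N - 1) (r + d)
        if 0 ≤ col ∧ col < N ∧ lo ≤ hi then
          fanGo dr dc N r c fuel (d + 1) (out ++ (PySem.List.pyRange hi (lo - 1) (-1)).map (fun row => (row, col)))
        else out

def make_first_seen_alt (seen_dir : Int) (N : Int) (r : Int) (c : Int) : List (Int × Int) :=
  let a := (PySem.List.pyGet? [((-1 : Int), (0 : Int)), (1, 0), (0, -1), (0, 1)] seen_dir).getD (0, 0)
  fanGo a.1 a.2 N r c (N.toNat + r.natAbs + c.natAbs + 2) 1 []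

-- ===== PRECONDITION & SPEC =====
-- Pre_ excludes exactly the directions outside [-4, 4), on which both Pythons raise IndexError.
def Pre_make_first_seen (seen_dir : Int) (N : Int) (r : Int) (c : Int) : Prop :=
  -4 ≤ seen_dir ∧ seen_dir < 4
instance (seen_dir : Int) (N : Int) (r : Int) (c : Int) : Decidable (Pre_make_first_seen seen_dir N r c) := by unfold Pre_make_first_seen; infer_instance

def pvWitness_make_first_seen : Int × Int × Int × Int := (0, 3, 1, 1)

def Spec_make_first_seen (seen_dir : Int) (N : Int) (r : Int) (c : Int) (out : List (Int × Int)) : Prop := out = make_first_seen_alt seen_dir N r c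
instance (seen_dir : Int) (N : Int) (r : Int) (c : Int) (out : List (Int × Int)) : Decidable (Spec_make_first_seen seen_dir N r c out) := by unfold Spec_make_first_seen; infer_instance

-- ===== CLAIM (what is proved, stated in full; the proofs are below) =====
def Claim_equal_make_first_seen : Prop := ∀ (seen_dir : Int) (N : Int) (r : Int) (c : Int), Dom_make_first_seen seen_dir N r c → Pre_make_first_seen seen_dir N r c → Spec_make_first_seen seen_dir N r c (make_first_seen seen_dir N r c)

-- ===== LEMMAS AND PROOFS =====

-- cells (mk P lo), (mk P (lo+1)), …, (mk P hi): one BFS level in its generation order,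
-- in abstract coordinates (P = coordinate along the view axis, second arg = transverse)
def ascM (mk : Int → Int → Int × Int) (P lo hi : Int) : List (Int × Int) :=
  (PySem.List.pyRange lo (hi + 1) 1).map (mk P)

-- the level-by-level enumeration, in abstract coordinates
def specGo (mk : Int → Int → Int × Int) (s pA pB N p0 q0 : Int) : Nat → Int → List (Int × Int) → List (Int × Int)
  | 0, _, out => out
  | fuel + 1, d, out =>
      let P := p0 + s * d
      let lo := max pA (q0 - d)
      let hi := min pB (q0 + d)
      if 0 ≤ P ∧ P < N ∧ lo ≤ hi then specGo mk s pA pB N p0 q0 fuel (d + 1) (out ++ ascM mk P lo hi)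
      else out

-- the geometry shared by the four directions: mk maps abstract (axis, transverse)
-- coordinates to board coordinates, the three moves step the axis by s and the
-- transverse coordinate by -1, 0, +1 (in generation order), the board is
-- 0 ≤ axis < N, pA ≤ transverse ≤ pB
structure Geom (mk : Int → Int → Int × Int) (m1 m2 m3 : Int × Int) (s pA pB N : Int) : Prop where
  inj : ∀ p q p' q', mk p q = mk p' q' → p = p' ∧ q = q'
  check : ∀ p q, check_B (mk p q).1 (mk p q).2 N = decide (0 ≤ p ∧ p < N ∧ pA ≤ q ∧ q ≤ pB)
  ch1 : ∀ p q, ((mk p q).1 + m1.1, (mk p q).2 + m1.2) = mk (p + s) (q - 1)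
  ch2 : ∀ p q, ((mk p q).1 + m2.1, (mk p q).2 + m2.2) = mk (p + s) q
  ch3 : ∀ p q, ((mk p q).1 + m3.1, (mk p q).2 + m3.2) = mk (p + s) (q + 1)
  s_unit : s = 1 ∨ s = -1

def step1 (m : Int × Int) (N cr cc : Int)
    (st : List (Int × Int) × PySem.Set (Int × Int) × List (Int × Int)) :
    List (Int × Int) × PySem.Set (Int × Int) × List (Int × Int) :=
  if check_B (cr + m.1) (cc + m.2) N && !(PySem.Set.contains st.2.1 (cr + m.1, cc + m.2)) then
    (st.1 ++ [(cr + m.1, cc + m.2)], PySem.Set.add st.2.1 (cr + m.1, cc + m.2), st.2.2 ++ [(cr + m.1, cc + m.2)])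
  else st

def sstep1 (m : Int × Int) (N cr cc : Int)
    (st : List (Int × Int) × PySem.Set (Int × Int) × List (Int × Int)) :
    List (Int × Int) × PySem.Set (Int × Int) × List (Int × Int) :=
  if check_B (cr + m.1) (cc + m.2) N then
    (st.1 ++ [(cr + m.1, cc + m.2)], PySem.Set.add st.2.1 (cr + m.1, cc + m.2), st.2.2 ++ [(cr + m.1, cc + m.2)])
  else st

theorem bfsRun_cons (m1 m2 m3 : Int × Int) (N : Int) (fuel : Nat) (cur : Int × Int)
    (q : List (Int × Int)) (vis : PySem.Set (Int × Int)) (seen : List (Int × Int)) :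
    bfsRun [m1, m2, m3] N (fuel + 1) (cur :: q) vis seen =
      (fun st => bfsRun [m1, m2, m3] N fuel st.1 st.2.1 st.2.2)
        (step1 m3 N cur.1 cur.2 (step1 m2 N cur.1 cur.2 (step1 m1 N cur.1 cur.2 (q, vis, seen)))) := rfl

theorem bfsAll_expand (m1 m2 m3 : Int × Int) (N r c : Int) :
    bfsAll [m1, m2, m3] N r c =
      (fun st => bfsRun [m1, m2, m3] N (N.toNat * N.toNat + N.toNat + 1) st.1 st.2.1 st.2.2)
        (sstep1 m3 N r c (sstep1 m2 N r c (sstep1 m1 N r c ([], [], [])))) := rfl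

theorem ascM_nil (mk : Int → Int → Int × Int) (P lo hi : Int) (h : hi < lo) :
    ascM mk P lo hi = [] := by
  simp [ascM, PySem.List.pyRange_one_eq_nil (by omega : hi + 1 ≤ lo)]

theorem ascM_cons (mk : Int → Int → Int × Int) (P lo hi : Int) (h : lo ≤ hi) :
    ascM mk P lo hi = mk P lo :: ascM mk P (lo + 1) hi := by
  rw [ascM, PySem.List.pyRange_one_cons (by omega : lo < hi + 1)]; rfl

theorem ascM_append (mk : Int → Int → Int × Int) (P lo W hi : Int) (h1 : lo ≤ W + 1) (h2 : W ≤ hi) :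
    ascM mk P lo W ++ ascM mk P (W + 1) hi = ascM mk P lo hi := by
  rw [ascM, ascM, ascM, ← List.map_append,
    ← PySem.List.pyRange_one_append lo (W + 1) (hi + 1) h1 (by omega)]

theorem mem_ascM (mk : Int → Int → Int × Int) (P lo hi : Int) (e : Int × Int) :
    e ∈ ascM mk P lo hi ↔ ∃ y, lo ≤ y ∧ y ≤ hi ∧ e = mk P y := by
  simp only [ascM, List.mem_map, PySem.List.mem_pyRange_one]
  constructor
  · rintro ⟨y, ⟨hy1, hy2⟩, rfl⟩; exact ⟨y, hy1, by omega, rfl⟩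
  · rintro ⟨y, hy1, hy2, rfl⟩; exact ⟨y, ⟨hy1, by omega⟩, rfl⟩

theorem setContains_eq (s : List (Int × Int)) (x : Int × Int) :
    PySem.Set.contains s x = decide (x ∈ s) := by
  simp [PySem.Set.contains]

-- processing one parent cell of a level
theorem step1_eq (m : Int × Int) (N cr cc : Int) (q : List (Int × Int))
    (vis : PySem.Set (Int × Int)) (seen : List (Int × Int)) (cell : Int × Int)
    (hm : (cr + m.1, cc + m.2) = cell) :
    step1 m N cr cc (q, vis, seen) =
      if check_B cell.1 cell.2 N && !(PySem.Set.contains vis cell) then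
        (q ++ [cell], PySem.Set.add vis cell, seen ++ [cell])
      else (q, vis, seen) := by
  subst hm; rfl

theorem parent_step {mk : Int → Int → Int × Int} {m1 m2 m3 : Int × Int} {s pA pB N : Int}
    (G : Geom mk m1 m2 m3 s pA pB N) (P lo x W : Int)
    (q vis seen : List (Int × Int))
    (hPr : 0 ≤ P + s) (hPr2 : P + s < N)
    (hlo : pA ≤ lo) (hx : lo ≤ x) (hxB : x ≤ pB)
    (hW : (x = lo ∧ W = max pA (lo - 1) - 1) ∨ (lo < x ∧ W = min pB x))
    (hvis : ∀ y, mk (P + s) y ∈ vis ↔ max pA (lo - 1) ≤ y ∧ y ≤ W) :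
    step1 m3 N (mk P x).1 (mk P x).2 (step1 m2 N (mk P x).1 (mk P x).2 (step1 m1 N (mk P x).1 (mk P x).2 (q, vis, seen)))
      = (q ++ ascM mk (P + s) (W + 1) (min pB (x + 1)),
         vis ++ ascM mk (P + s) (W + 1) (min pB (x + 1)),
         seen ++ ascM mk (P + s) (W + 1) (min pB (x + 1))) := by
  rcases hW with ⟨hxlo, hWd⟩ | ⟨hxlo, hWd⟩
  · -- first parent of the level: x = lo, nothing of the children row is visited yet
    subst hxlo
    have hvisF : ∀ y, mk (P + s) y ∉ vis := fun y hm => by have := (hvis y).1 hm; omega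
    by_cases hb1 : pA ≤ x - 1
    · have e1 : step1 m1 N (mk P x).1 (mk P x).2 (q, vis, seen)
          = (q ++ [mk (P + s) (x - 1)], vis ++ [mk (P + s) (x - 1)], seen ++ [mk (P + s) (x - 1)]) := by
        rw [step1_eq m1 N _ _ _ _ _ _ (G.ch1 P x), G.check, setContains_eq,
            decide_eq_false (hvisF (x - 1)),
            decide_eq_true (show 0 ≤ P + s ∧ P + s < N ∧ pA ≤ x - 1 ∧ x - 1 ≤ pB from ⟨hPr, hPr2, hb1, by omega⟩),
            PySem.Set.add_of_not_mem (hvisF (x - 1))]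
        simp
      have hnm2 : mk (P + s) x ∉ vis ++ [mk (P + s) (x - 1)] := by
        intro h
        rcases List.mem_append.1 h with h | h
        · exact hvisF _ h
        · rw [List.mem_singleton] at h; have := (G.inj _ _ _ _ h).2; omega
      have e2 : step1 m2 N (mk P x).1 (mk P x).2 (q ++ [mk (P + s) (x - 1)], vis ++ [mk (P + s) (x - 1)], seen ++ [mk (P + s) (x - 1)])
          = ((q ++ [mk (P + s) (x - 1)]) ++ [mk (P + s) x], (vis ++ [mk (P + s) (x - 1)]) ++ [mk (P + s) x], (seen ++ [mk (P + s) (x - 1)]) ++ [mk (P + s) x]) := by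
        rw [step1_eq m2 N _ _ _ _ _ _ (G.ch2 P x), G.check, setContains_eq,
            decide_eq_false hnm2,
            decide_eq_true (show 0 ≤ P + s ∧ P + s < N ∧ pA ≤ x ∧ x ≤ pB from ⟨hPr, hPr2, by omega, hxB⟩),
            PySem.Set.add_of_not_mem hnm2]
        simp
      have hnm3 : mk (P + s) (x + 1) ∉ (vis ++ [mk (P + s) (x - 1)]) ++ [mk (P + s) x] := by
        intro h
        rcases List.mem_append.1 h with h | h
        · rcases List.mem_append.1 h with h | h
          · exact hvisF _ h
          · rw [List.mem_singleton] at h; have := (G.inj _ _ _ _ h).2; omega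
        · rw [List.mem_singleton] at h; have := (G.inj _ _ _ _ h).2; omega
      by_cases hb3 : x + 1 ≤ pB
      · have e3 : step1 m3 N (mk P x).1 (mk P x).2 ((q ++ [mk (P + s) (x - 1)]) ++ [mk (P + s) x], (vis ++ [mk (P + s) (x - 1)]) ++ [mk (P + s) x], (seen ++ [mk (P + s) (x - 1)]) ++ [mk (P + s) x])
            = (((q ++ [mk (P + s) (x - 1)]) ++ [mk (P + s) x]) ++ [mk (P + s) (x + 1)],
               ((vis ++ [mk (P + s) (x - 1)]) ++ [mk (P + s) x]) ++ [mk (P + s) (x + 1)],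
               ((seen ++ [mk (P + s) (x - 1)]) ++ [mk (P + s) x]) ++ [mk (P + s) (x + 1)]) := by
          rw [step1_eq m3 N _ _ _ _ _ _ (G.ch3 P x), G.check, setContains_eq,
              decide_eq_false hnm3,
              decide_eq_true (show 0 ≤ P + s ∧ P + s < N ∧ pA ≤ x + 1 ∧ x + 1 ≤ pB from ⟨hPr, hPr2, by omega, hb3⟩),
              PySem.Set.add_of_not_mem hnm3]
          simp
        have hnc : ascM mk (P + s) (W + 1) (min pB (x + 1)) = [mk (P + s) (x - 1), mk (P + s) x, mk (P + s) (x + 1)] := by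
          rw [show W + 1 = x - 1 by omega, show min pB (x + 1) = x + 1 by omega,
              ascM_cons _ _ _ _ (by omega), show (x - 1 + 1 : Int) = x by ring,
              ascM_cons _ _ _ _ (by omega), ascM_cons _ _ _ _ (by omega),
              ascM_nil _ _ _ _ (by omega)]
        rw [e1, e2, e3, hnc]
        simp
      · have e3 : step1 m3 N (mk P x).1 (mk P x).2 ((q ++ [mk (P + s) (x - 1)]) ++ [mk (P + s) x], (vis ++ [mk (P + s) (x - 1)]) ++ [mk (P + s) x], (seen ++ [mk (P + s) (x - 1)]) ++ [mk (P + s) x])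
            = ((q ++ [mk (P + s) (x - 1)]) ++ [mk (P + s) x], (vis ++ [mk (P + s) (x - 1)]) ++ [mk (P + s) x], (seen ++ [mk (P + s) (x - 1)]) ++ [mk (P + s) x]) := by
          rw [step1_eq m3 N _ _ _ _ _ _ (G.ch3 P x), G.check,
              decide_eq_false (fun hp => hb3 hp.2.2.2)]
          simp
        have hnc : ascM mk (P + s) (W + 1) (min pB (x + 1)) = [mk (P + s) (x - 1), mk (P + s) x] := by
          rw [show W + 1 = x - 1 by omega, show min pB (x + 1) = x by omega,
              ascM_cons _ _ _ _ (by omega), show (x - 1 + 1 : Int) = x by ring,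
              ascM_cons _ _ _ _ (by omega), ascM_nil _ _ _ _ (by omega)]
        rw [e1, e2, e3, hnc]
        simp
    · -- x = lo with x - 1 off the board
      have e1 : step1 m1 N (mk P x).1 (mk P x).2 (q, vis, seen) = (q, vis, seen) := by
        rw [step1_eq m1 N _ _ _ _ _ _ (G.ch1 P x), G.check,
            decide_eq_false (fun hp => hb1 hp.2.2.1)]
        simp
      have e2 : step1 m2 N (mk P x).1 (mk P x).2 (q, vis, seen)
          = (q ++ [mk (P + s) x], vis ++ [mk (P + s) x], seen ++ [mk (P + s) x]) := by
        rw [step1_eq m2 N _ _ _ _ _ _ (G.ch2 P x), G.check, setContains_eq,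
            decide_eq_false (hvisF x),
            decide_eq_true (show 0 ≤ P + s ∧ P + s < N ∧ pA ≤ x ∧ x ≤ pB from ⟨hPr, hPr2, by omega, hxB⟩),
            PySem.Set.add_of_not_mem (hvisF x)]
        simp
      have hnm3 : mk (P + s) (x + 1) ∉ vis ++ [mk (P + s) x] := by
        intro h
        rcases List.mem_append.1 h with h | h
        · exact hvisF _ h
        · rw [List.mem_singleton] at h; have := (G.inj _ _ _ _ h).2; omega
      by_cases hb3 : x + 1 ≤ pB
      · have e3 : step1 m3 N (mk P x).1 (mk P x).2 (q ++ [mk (P + s) x], vis ++ [mk (P + s) x], seen ++ [mk (P + s) x])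
            = ((q ++ [mk (P + s) x]) ++ [mk (P + s) (x + 1)], (vis ++ [mk (P + s) x]) ++ [mk (P + s) (x + 1)], (seen ++ [mk (P + s) x]) ++ [mk (P + s) (x + 1)]) := by
          rw [step1_eq m3 N _ _ _ _ _ _ (G.ch3 P x), G.check, setContains_eq,
              decide_eq_false hnm3,
              decide_eq_true (show 0 ≤ P + s ∧ P + s < N ∧ pA ≤ x + 1 ∧ x + 1 ≤ pB from ⟨hPr, hPr2, by omega, hb3⟩),
              PySem.Set.add_of_not_mem hnm3]
          simp
        have hnc : ascM mk (P + s) (W + 1) (min pB (x + 1)) = [mk (P + s) x, mk (P + s) (x + 1)] := by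
          rw [show W + 1 = x by omega, show min pB (x + 1) = x + 1 by omega,
              ascM_cons _ _ _ _ (by omega), ascM_cons _ _ _ _ (by omega),
              ascM_nil _ _ _ _ (by omega)]
        rw [e1, e2, e3, hnc]
        simp
      · have e3 : step1 m3 N (mk P x).1 (mk P x).2 (q ++ [mk (P + s) x], vis ++ [mk (P + s) x], seen ++ [mk (P + s) x])
            = (q ++ [mk (P + s) x], vis ++ [mk (P + s) x], seen ++ [mk (P + s) x]) := by
          rw [step1_eq m3 N _ _ _ _ _ _ (G.ch3 P x), G.check,
              decide_eq_false (fun hp => hb3 hp.2.2.2)]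
          simp
        have hnc : ascM mk (P + s) (W + 1) (min pB (x + 1)) = [mk (P + s) x] := by
          rw [show W + 1 = x by omega, show min pB (x + 1) = x by omega,
              ascM_cons _ _ _ _ (by omega), ascM_nil _ _ _ _ (by omega)]
        rw [e1, e2, e3, hnc]
  · -- a later parent: only its rightmost child can be new
    have hWx : W = x := by omega
    have e1 : step1 m1 N (mk P x).1 (mk P x).2 (q, vis, seen) = (q, vis, seen) := by
      rw [step1_eq m1 N _ _ _ _ _ _ (G.ch1 P x), G.check, setContains_eq,
          decide_eq_true ((hvis (x - 1)).2 ⟨by omega, by omega⟩)]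
      simp
    have e2 : step1 m2 N (mk P x).1 (mk P x).2 (q, vis, seen) = (q, vis, seen) := by
      rw [step1_eq m2 N _ _ _ _ _ _ (G.ch2 P x), G.check, setContains_eq,
          decide_eq_true ((hvis x).2 ⟨by omega, by omega⟩)]
      simp
    by_cases hb3 : x + 1 ≤ pB
    · have hnm3 : mk (P + s) (x + 1) ∉ vis := fun hm => by have := (hvis _).1 hm; omega
      have e3 : step1 m3 N (mk P x).1 (mk P x).2 (q, vis, seen)
          = (q ++ [mk (P + s) (x + 1)], vis ++ [mk (P + s) (x + 1)], seen ++ [mk (P + s) (x + 1)]) := by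
        rw [step1_eq m3 N _ _ _ _ _ _ (G.ch3 P x), G.check, setContains_eq,
            decide_eq_false hnm3,
            decide_eq_true (show 0 ≤ P + s ∧ P + s < N ∧ pA ≤ x + 1 ∧ x + 1 ≤ pB from ⟨hPr, hPr2, by omega, hb3⟩),
            PySem.Set.add_of_not_mem hnm3]
        simp
      have hnc : ascM mk (P + s) (W + 1) (min pB (x + 1)) = [mk (P + s) (x + 1)] := by
        rw [show W + 1 = x + 1 by omega, show min pB (x + 1) = x + 1 by omega,
            ascM_cons _ _ _ _ (by omega), ascM_nil _ _ _ _ (by omega)]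
      rw [e1, e2, e3, hnc]
    · have e3 : step1 m3 N (mk P x).1 (mk P x).2 (q, vis, seen) = (q, vis, seen) := by
        rw [step1_eq m3 N _ _ _ _ _ _ (G.ch3 P x), G.check,
            decide_eq_false (fun hp => hb3 hp.2.2.2)]
        simp
      have hnc : ascM mk (P + s) (W + 1) (min pB (x + 1)) = [] :=
        ascM_nil _ _ _ _ (by omega)
      rw [e1, e2, e3, hnc]
      simp

-- a whole level whose children row is on the board
theorem level_run {mk : Int → Int → Int × Int} {m1 m2 m3 : Int × Int} {s pA pB N : Int}
    (G : Geom mk m1 m2 m3 s pA pB N) (P lo hi : Int)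
    (hPr : 0 ≤ P + s) (hPr2 : P + s < N) (hlo : pA ≤ lo) (hhi : hi ≤ pB) :
    ∀ k : Nat, ∀ (x W : Int) (fuel : Nat) (vis seen chq : List (Int × Int)),
      lo ≤ x → x ≤ hi → (hi - x).toNat = k →
      ((x = lo ∧ W = max pA (lo - 1) - 1) ∨ (lo < x ∧ W = min pB x)) →
      chq = ascM mk (P + s) (max pA (lo - 1)) W →
      (∀ y, mk (P + s) y ∈ vis ↔ max pA (lo - 1) ≤ y ∧ y ≤ W) →
      (hi + 1 - x).toNat ≤ fuel →
      bfsRun [m1, m2, m3] N fuel (ascM mk P x hi ++ chq) vis seen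
        = bfsRun [m1, m2, m3] N (fuel - (hi + 1 - x).toNat)
            (ascM mk (P + s) (max pA (lo - 1)) (min pB (hi + 1)))
            (vis ++ ascM mk (P + s) (W + 1) (min pB (hi + 1)))
            (seen ++ ascM mk (P + s) (W + 1) (min pB (hi + 1))) := by
  intro k
  induction k with
  | zero =>
      intro x W fuel vis seen chq hx hxhi hk hW hchq hvis hfuel
      have hxe : x = hi := by omega
      subst hxe
      have hxB : x ≤ pB := by omega
      obtain ⟨f, rfl⟩ : ∃ f, fuel = f + 1 := ⟨fuel - 1, by omega⟩
      have hA1 : max pA (lo - 1) ≤ W + 1 := by rcases hW with ⟨h1, h2⟩ | ⟨h1, h2⟩ <;> omega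
      have hA2 : W ≤ min pB (x + 1) := by rcases hW with ⟨h1, h2⟩ | ⟨h1, h2⟩ <;> omega
      have hq : chq ++ ascM mk (P + s) (W + 1) (min pB (x + 1)) = ascM mk (P + s) (max pA (lo - 1)) (min pB (x + 1)) := by
        rw [hchq]; exact ascM_append _ _ _ _ _ hA1 hA2
      rw [ascM_cons mk P x x le_rfl, ascM_nil mk P (x + 1) x (by omega),
          List.singleton_append, bfsRun_cons,
          parent_step G P lo x W chq vis seen hPr hPr2 hlo hx hxB hW hvis, hq]
      have hf : f + 1 - (x + 1 - x).toNat = f := by omega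
      rw [hf]
  | succ k ih =>
      intro x W fuel vis seen chq hx hxhi hk hW hchq hvis hfuel
      have hxB : x ≤ pB := by omega
      obtain ⟨f, rfl⟩ : ∃ f, fuel = f + 1 := ⟨fuel - 1, by omega⟩
      have hA1 : max pA (lo - 1) ≤ W + 1 := by rcases hW with ⟨h1, h2⟩ | ⟨h1, h2⟩ <;> omega
      have hA2 : W ≤ min pB (x + 1) := by rcases hW with ⟨h1, h2⟩ | ⟨h1, h2⟩ <;> omega
      have hq : chq ++ ascM mk (P + s) (W + 1) (min pB (x + 1)) = ascM mk (P + s) (max pA (lo - 1)) (min pB (x + 1)) := by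
        rw [hchq]; exact ascM_append _ _ _ _ _ hA1 hA2
      rw [ascM_cons mk P x hi (by omega), List.cons_append, bfsRun_cons,
          parent_step G P lo x W (ascM mk P (x + 1) hi ++ chq) vis seen hPr hPr2 hlo hx hxB hW hvis]
      simp only [List.append_assoc]
      rw [hq]
      have hvis' : ∀ y, mk (P + s) y ∈ vis ++ ascM mk (P + s) (W + 1) (min pB (x + 1)) ↔
          max pA (lo - 1) ≤ y ∧ y ≤ min pB (x + 1) := by
        intro y
        rw [List.mem_append, hvis y, mem_ascM]
        constructor
        · rintro (⟨h1, h2⟩ | ⟨y', hy1, hy2, he⟩)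
          · omega
          · have := (G.inj _ _ _ _ he).2; omega
        · rintro ⟨h1, h2⟩
          by_cases hy : y ≤ W
          · exact Or.inl ⟨h1, hy⟩
          · exact Or.inr ⟨y, by omega, by omega, rfl⟩
      have := ih (x + 1) (min pB (x + 1)) f (vis ++ ascM mk (P + s) (W + 1) (min pB (x + 1)))
          (seen ++ ascM mk (P + s) (W + 1) (min pB (x + 1)))
          (ascM mk (P + s) (max pA (lo - 1)) (min pB (x + 1)))
          (by omega) (by omega) (by omega)
          (Or.inr ⟨by omega, rfl⟩) rfl hvis' (by omega)
      rw [this]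
      have hf : f - (hi + 1 - (x + 1)).toNat = f + 1 - (hi + 1 - x).toNat := by omega
      rw [hf, List.append_assoc, List.append_assoc,
          ascM_append mk (P + s) (W + 1) (min pB (x + 1)) (min pB (hi + 1)) (by omega) (by omega)]

-- a level whose children row is off the board: the queue just drains
theorem dead_run {mk : Int → Int → Int × Int} {m1 m2 m3 : Int × Int} {s pA pB N : Int}
    (G : Geom mk m1 m2 m3 s pA pB N) (P : Int) (hdead : ¬ (0 ≤ P + s ∧ P + s < N)) :
    ∀ cells : List (Int × Int), ∀ (fuel : Nat) (vis : PySem.Set (Int × Int)) (seen : List (Int × Int)),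
      (∀ e ∈ cells, ∃ y, e = mk P y) → cells.length < fuel →
      bfsRun [m1, m2, m3] N fuel cells vis seen = seen := by
  intro cells
  induction cells with
  | nil =>
      intro fuel vis seen _ hf
      obtain ⟨f, rfl⟩ : ∃ f, fuel = f + 1 := ⟨fuel - 1, by omega⟩
      rfl
  | cons e rest ih =>
      intro fuel vis seen hcells hf
      obtain ⟨f, rfl⟩ : ∃ f, fuel = f + 1 := ⟨fuel - 1, by omega⟩
      obtain ⟨y, rfl⟩ := hcells _ (List.mem_cons_self)
      rw [bfsRun_cons]
      have hskip : ∀ (m : Int × Int) (q' : Int) (st : List (Int × Int) × PySem.Set (Int × Int) × List (Int × Int)),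
          ((mk P y).1 + m.1, (mk P y).2 + m.2) = mk (P + s) q' → step1 m N (mk P y).1 (mk P y).2 st = st := by
        intro m q' st hm
        have h1 : (mk P y).1 + m.1 = (mk (P + s) q').1 := by rw [← hm]
        have h2 : (mk P y).2 + m.2 = (mk (P + s) q').2 := by rw [← hm]
        have hcb : check_B ((mk P y).1 + m.1) ((mk P y).2 + m.2) N = false := by
          rw [h1, h2, G.check]
          exact decide_eq_false (fun hp => hdead ⟨hp.1, hp.2.1⟩)
        simp [step1, hcb]
      rw [hskip m1 (y - 1) _ (G.ch1 P y), hskip m2 y _ (G.ch2 P y), hskip m3 (y + 1) _ (G.ch3 P y)]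
      exact ih f vis seen (fun e he => hcells e (List.mem_cons_of_mem _ he)) (by simpa using Nat.lt_of_succ_lt_succ hf)

def rlv (s N p : Int) : Nat := (if s = -1 then p + 1 else N - p).toNat

-- the main simulation: from a full level-d queue the BFS produces exactly the
-- remaining levels of the fan
theorem length_ascM (mk : Int → Int → Int × Int) (P lo hi : Int) :
    (ascM mk P lo hi).length = (hi + 1 - lo).toNat := by
  simp [ascM, PySem.List.length_pyRange_one]

theorem fan_run {mk : Int → Int → Int × Int} {m1 m2 m3 : Int × Int} {s pA pB N : Int}
    (G : Geom mk m1 m2 m3 s pA pB N) (p0 q0 : Int) :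
    ∀ fb : Nat, ∀ (fa : Nat) (d : Int) (vis seen : List (Int × Int)),
      1 ≤ d → 0 ≤ p0 + s * d → p0 + s * d < N → max pA (q0 - d) ≤ min pB (q0 + d) →
      (∀ j y, 1 ≤ j → mk (p0 + s * d + s * j) y ∉ vis) →
      rlv s N (p0 + s * d) * (pB + 1 - pA).toNat + (pB + 1 - pA).toNat + 1 ≤ fa →
      rlv s N (p0 + s * d) ≤ fb →
      bfsRun [m1, m2, m3] N fa (ascM mk (p0 + s * d) (max pA (q0 - d)) (min pB (q0 + d))) vis seen
        = specGo mk s pA pB N p0 q0 fb (d + 1) seen := by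
  intro fb
  induction fb with
  | zero =>
      intro fa d vis seen h1 h2 h3 h4 hdeep hfa hfb
      exfalso
      rcases G.s_unit with h | h <;> subst h <;> simp [rlv] at hfb <;> omega
  | succ fb ih =>
      intro fa d vis seen h1 h2 h3 h4 hdeep hfa hfb
      have hPs : p0 + s * d + s = p0 + s * (d + 1) := by ring
      have hw : ((min pB (q0 + d)) + 1 - (max pA (q0 - d))).toNat ≤ (pB + 1 - pA).toNat := by omega
      simp only [specGo]
      by_cases hP' : 0 ≤ p0 + s * (d + 1) ∧ p0 + s * (d + 1) < N
      · rw [if_pos (⟨hP'.1, hP'.2, by omega⟩ :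
          0 ≤ p0 + s * (d + 1) ∧ p0 + s * (d + 1) < N ∧ max pA (q0 - (d + 1)) ≤ min pB (q0 + (d + 1)))]
        have hlo' : max pA (max pA (q0 - d) - 1) = max pA (q0 - (d + 1)) := by omega
        have hhi' : min pB (min pB (q0 + d) + 1) = min pB (q0 + (d + 1)) := by omega
        have hvis0 : ∀ y, mk (p0 + s * d + s) y ∈ vis ↔
            max pA (max pA (q0 - d) - 1) ≤ y ∧ y ≤ max pA (max pA (q0 - d) - 1) - 1 := by
          intro y
          constructor
          · intro h
            have := hdeep 1 y le_rfl
            rw [mul_one] at this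
            exact absurd h this
          · intro h; omega
        have hlr := level_run G (p0 + s * d) (max pA (q0 - d)) (min pB (q0 + d))
          (by omega) (by omega) (le_max_left _ _) (min_le_left _ _)
          (min pB (q0 + d) - max pA (q0 - d)).toNat (max pA (q0 - d))
          (max pA (max pA (q0 - d) - 1) - 1) fa vis seen []
          le_rfl h4 rfl (Or.inl ⟨rfl, rfl⟩)
          (ascM_nil _ _ _ _ (by omega)).symm hvis0 (by omega)
        rw [List.append_nil] at hlr
        rw [hlr]
        rw [show max pA (max pA (q0 - d) - 1) - 1 + 1 = max pA (max pA (q0 - d) - 1) by ring,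
            hPs, hlo', hhi']
        have hrl : rlv s N (p0 + s * (d + 1)) + 1 = rlv s N (p0 + s * d) := by
          rcases G.s_unit with h | h <;> subst h <;> simp [rlv] <;> omega
        have hdeep' : ∀ j y, 1 ≤ j →
            mk (p0 + s * (d + 1) + s * j) y ∉
              vis ++ ascM mk (p0 + s * (d + 1)) (max pA (q0 - (d + 1))) (min pB (q0 + (d + 1))) := by
          intro j y hj h
          rcases List.mem_append.1 h with h | h
          · have he : p0 + s * (d + 1) + s * j = p0 + s * d + s * (j + 1) := by ring
            rw [he] at h
            exact hdeep (j + 1) y (by omega) h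
          · obtain ⟨y', _, _, he⟩ := (mem_ascM _ _ _ _ _).1 h
            have := (G.inj _ _ _ _ he).1
            rcases G.s_unit with hsv | hsv <;> subst hsv <;> omega
        have := ih (fa - (min pB (q0 + d) + 1 - max pA (q0 - d)).toNat) (d + 1)
          (vis ++ ascM mk (p0 + s * (d + 1)) (max pA (q0 - (d + 1))) (min pB (q0 + (d + 1))))
          (seen ++ ascM mk (p0 + s * (d + 1)) (max pA (q0 - (d + 1))) (min pB (q0 + (d + 1))))
          (by omega) hP'.1 hP'.2 (by omega) hdeep'
          (by
            have hprod : rlv s N (p0 + s * d) * (pB + 1 - pA).toNat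
                = rlv s N (p0 + s * (d + 1)) * (pB + 1 - pA).toNat + (pB + 1 - pA).toNat := by
              rw [← hrl]; ring
            omega)
          (by omega)
        rw [this]
      · rw [if_neg (fun hc => hP' ⟨hc.1, hc.2.1⟩)]
        refine dead_run G (p0 + s * d) (by rw [hPs]; exact hP') _ fa vis seen ?_ ?_
        · intro e he
          obtain ⟨y, _, _, he'⟩ := (mem_ascM _ _ _ _ _).1 he
          exact ⟨y, he'⟩
        · rw [length_ascM]; omega

theorem sstep1_eq (m : Int × Int) (N cr cc : Int) (q : List (Int × Int))
    (vis : PySem.Set (Int × Int)) (seen : List (Int × Int)) (cell : Int × Int)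
    (hm : (cr + m.1, cc + m.2) = cell) :
    sstep1 m N cr cc (q, vis, seen) =
      if check_B cell.1 cell.2 N then (q ++ [cell], PySem.Set.add vis cell, seen ++ [cell])
      else (q, vis, seen) := by
  subst hm; rfl

-- the three seeding steps build exactly the first level of the fan
theorem seeds_eq {mk : Int → Int → Int × Int} {m1 m2 m3 : Int × Int} {s pA pB N : Int}
    (G : Geom mk m1 m2 m3 s pA pB N) (p0 q0 r c : Int)
    (hstart : mk p0 q0 = (r, c)) (hP : 0 ≤ p0 + s ∧ p0 + s < N) :
    sstep1 m3 N r c (sstep1 m2 N r c (sstep1 m1 N r c ([], [], [])))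
      = (ascM mk (p0 + s) (max pA (q0 - 1)) (min pB (q0 + 1)),
         ascM mk (p0 + s) (max pA (q0 - 1)) (min pB (q0 + 1)),
         ascM mk (p0 + s) (max pA (q0 - 1)) (min pB (q0 + 1))) := by
  have hc1 := G.ch1 p0 q0; rw [hstart] at hc1
  have hc2 := G.ch2 p0 q0; rw [hstart] at hc2
  have hc3 := G.ch3 p0 q0; rw [hstart] at hc3
  have hne : ∀ y y' : Int, y ≠ y' → mk (p0 + s) y ≠ mk (p0 + s) y' :=
    fun y y' hyy he => hyy (G.inj _ _ _ _ he).2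
  by_cases b1 : pA ≤ q0 - 1 ∧ q0 - 1 ≤ pB
  · have e1 : sstep1 m1 N r c ([], [], []) = ([mk (p0 + s) (q0 - 1)], [mk (p0 + s) (q0 - 1)], [mk (p0 + s) (q0 - 1)]) := by
      rw [sstep1_eq m1 N r c _ _ _ _ hc1, G.check,
          decide_eq_true (show 0 ≤ p0 + s ∧ p0 + s < N ∧ pA ≤ q0 - 1 ∧ q0 - 1 ≤ pB from ⟨hP.1, hP.2, b1.1, b1.2⟩),
          PySem.Set.add_of_not_mem (List.not_mem_nil)]
      simp
    by_cases b2 : pA ≤ q0 ∧ q0 ≤ pB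
    · have hnm2 : mk (p0 + s) q0 ∉ [mk (p0 + s) (q0 - 1)] := by
        simpa using hne q0 (q0 - 1) (by omega)
      have e2 : sstep1 m2 N r c ([mk (p0 + s) (q0 - 1)], [mk (p0 + s) (q0 - 1)], [mk (p0 + s) (q0 - 1)])
          = ([mk (p0 + s) (q0 - 1), mk (p0 + s) q0], [mk (p0 + s) (q0 - 1), mk (p0 + s) q0], [mk (p0 + s) (q0 - 1), mk (p0 + s) q0]) := by
        rw [sstep1_eq m2 N r c _ _ _ _ hc2, G.check,
            decide_eq_true (show 0 ≤ p0 + s ∧ p0 + s < N ∧ pA ≤ q0 ∧ q0 ≤ pB from ⟨hP.1, hP.2, b2.1, b2.2⟩),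
            PySem.Set.add_of_not_mem hnm2]
        simp
      by_cases b3 : pA ≤ q0 + 1 ∧ q0 + 1 ≤ pB
      · have hnm3 : mk (p0 + s) (q0 + 1) ∉ [mk (p0 + s) (q0 - 1), mk (p0 + s) q0] := by
          simp only [List.mem_cons, List.mem_singleton, List.not_mem_nil, or_false]
          push_neg
          exact ⟨hne (q0 + 1) (q0 - 1) (by omega), hne (q0 + 1) q0 (by omega)⟩
        have e3 : sstep1 m3 N r c ([mk (p0 + s) (q0 - 1), mk (p0 + s) q0], [mk (p0 + s) (q0 - 1), mk (p0 + s) q0], [mk (p0 + s) (q0 - 1), mk (p0 + s) q0])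
            = ([mk (p0 + s) (q0 - 1), mk (p0 + s) q0, mk (p0 + s) (q0 + 1)], [mk (p0 + s) (q0 - 1), mk (p0 + s) q0, mk (p0 + s) (q0 + 1)], [mk (p0 + s) (q0 - 1), mk (p0 + s) q0, mk (p0 + s) (q0 + 1)]) := by
          rw [sstep1_eq m3 N r c _ _ _ _ hc3, G.check,
              decide_eq_true (show 0 ≤ p0 + s ∧ p0 + s < N ∧ pA ≤ q0 + 1 ∧ q0 + 1 ≤ pB from ⟨hP.1, hP.2, b3.1, b3.2⟩),
              PySem.Set.add_of_not_mem hnm3]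
          simp
        rw [e1, e2, e3,
            show max pA (q0 - 1) = q0 - 1 by omega, show min pB (q0 + 1) = q0 + 1 by omega,
            ascM_cons _ _ _ _ (by omega), show (q0 - 1 + 1 : Int) = q0 by ring,
            ascM_cons _ _ _ _ (by omega), ascM_cons _ _ _ _ (by omega), ascM_nil _ _ _ _ (by omega)]
      · have e3 : sstep1 m3 N r c ([mk (p0 + s) (q0 - 1), mk (p0 + s) q0], [mk (p0 + s) (q0 - 1), mk (p0 + s) q0], [mk (p0 + s) (q0 - 1), mk (p0 + s) q0])
            = ([mk (p0 + s) (q0 - 1), mk (p0 + s) q0], [mk (p0 + s) (q0 - 1), mk (p0 + s) q0], [mk (p0 + s) (q0 - 1), mk (p0 + s) q0]) := by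
          rw [sstep1_eq m3 N r c _ _ _ _ hc3, G.check,
              decide_eq_false (fun hp => b3 ⟨hp.2.2.1, hp.2.2.2⟩)]
          simp
        rw [e1, e2, e3,
            show max pA (q0 - 1) = q0 - 1 by omega, show min pB (q0 + 1) = q0 by omega,
            ascM_cons _ _ _ _ (by omega), show (q0 - 1 + 1 : Int) = q0 by ring,
            ascM_cons _ _ _ _ (by omega), ascM_nil _ _ _ _ (by omega)]
    · -- b1 true, b2 false: forces pB = q0 - 1, so the third child is off the board too
      have b3 : ¬ (pA ≤ q0 + 1 ∧ q0 + 1 ≤ pB) := by omega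
      have e2 : sstep1 m2 N r c ([mk (p0 + s) (q0 - 1)], [mk (p0 + s) (q0 - 1)], [mk (p0 + s) (q0 - 1)])
          = ([mk (p0 + s) (q0 - 1)], [mk (p0 + s) (q0 - 1)], [mk (p0 + s) (q0 - 1)]) := by
        rw [sstep1_eq m2 N r c _ _ _ _ hc2, G.check,
            decide_eq_false (fun hp => b2 ⟨hp.2.2.1, hp.2.2.2⟩)]
        simp
      have e3 : sstep1 m3 N r c ([mk (p0 + s) (q0 - 1)], [mk (p0 + s) (q0 - 1)], [mk (p0 + s) (q0 - 1)])
          = ([mk (p0 + s) (q0 - 1)], [mk (p0 + s) (q0 - 1)], [mk (p0 + s) (q0 - 1)]) := by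
        rw [sstep1_eq m3 N r c _ _ _ _ hc3, G.check,
            decide_eq_false (fun hp => b3 ⟨hp.2.2.1, hp.2.2.2⟩)]
        simp
      rw [e1, e2, e3,
          show max pA (q0 - 1) = q0 - 1 by omega, show min pB (q0 + 1) = q0 - 1 by omega,
          ascM_cons _ _ _ _ (by omega), ascM_nil _ _ _ _ (by omega)]
  · have e1 : sstep1 m1 N r c ([], [], []) = ([], [], []) := by
      rw [sstep1_eq m1 N r c _ _ _ _ hc1, G.check,
          decide_eq_false (fun hp => b1 ⟨hp.2.2.1, hp.2.2.2⟩)]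
      simp
    by_cases b2 : pA ≤ q0 ∧ q0 ≤ pB
    · have e2 : sstep1 m2 N r c ([], [], [])
          = ([mk (p0 + s) q0], [mk (p0 + s) q0], [mk (p0 + s) q0]) := by
        rw [sstep1_eq m2 N r c _ _ _ _ hc2, G.check,
            decide_eq_true (show 0 ≤ p0 + s ∧ p0 + s < N ∧ pA ≤ q0 ∧ q0 ≤ pB from ⟨hP.1, hP.2, b2.1, b2.2⟩),
            PySem.Set.add_of_not_mem (List.not_mem_nil)]
        simp
      by_cases b3 : pA ≤ q0 + 1 ∧ q0 + 1 ≤ pB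
      · have hnm3 : mk (p0 + s) (q0 + 1) ∉ [mk (p0 + s) q0] := by
          simpa using hne (q0 + 1) q0 (by omega)
        have e3 : sstep1 m3 N r c ([mk (p0 + s) q0], [mk (p0 + s) q0], [mk (p0 + s) q0])
            = ([mk (p0 + s) q0, mk (p0 + s) (q0 + 1)], [mk (p0 + s) q0, mk (p0 + s) (q0 + 1)], [mk (p0 + s) q0, mk (p0 + s) (q0 + 1)]) := by
          rw [sstep1_eq m3 N r c _ _ _ _ hc3, G.check,
              decide_eq_true (show 0 ≤ p0 + s ∧ p0 + s < N ∧ pA ≤ q0 + 1 ∧ q0 + 1 ≤ pB from ⟨hP.1, hP.2, b3.1, b3.2⟩),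
              PySem.Set.add_of_not_mem hnm3]
          simp
        rw [e1, e2, e3,
            show max pA (q0 - 1) = q0 by omega, show min pB (q0 + 1) = q0 + 1 by omega,
            ascM_cons _ _ _ _ (by omega), ascM_cons _ _ _ _ (by omega), ascM_nil _ _ _ _ (by omega)]
      · have e3 : sstep1 m3 N r c ([mk (p0 + s) q0], [mk (p0 + s) q0], [mk (p0 + s) q0])
            = ([mk (p0 + s) q0], [mk (p0 + s) q0], [mk (p0 + s) q0]) := by
          rw [sstep1_eq m3 N r c _ _ _ _ hc3, G.check,
              decide_eq_false (fun hp => b3 ⟨hp.2.2.1, hp.2.2.2⟩)]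
          simp
        rw [e1, e2, e3,
            show max pA (q0 - 1) = q0 by omega, show min pB (q0 + 1) = q0 by omega,
            ascM_cons _ _ _ _ (by omega), ascM_nil _ _ _ _ (by omega)]
    · have e2 : sstep1 m2 N r c ([], [], []) = ([], [], []) := by
        rw [sstep1_eq m2 N r c _ _ _ _ hc2, G.check,
            decide_eq_false (fun hp => b2 ⟨hp.2.2.1, hp.2.2.2⟩)]
        simp
      by_cases b3 : pA ≤ q0 + 1 ∧ q0 + 1 ≤ pB
      · have e3 : sstep1 m3 N r c ([], [], [])
            = ([mk (p0 + s) (q0 + 1)], [mk (p0 + s) (q0 + 1)], [mk (p0 + s) (q0 + 1)]) := by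
          rw [sstep1_eq m3 N r c _ _ _ _ hc3, G.check,
              decide_eq_true (show 0 ≤ p0 + s ∧ p0 + s < N ∧ pA ≤ q0 + 1 ∧ q0 + 1 ≤ pB from ⟨hP.1, hP.2, b3.1, b3.2⟩),
              PySem.Set.add_of_not_mem (List.not_mem_nil)]
          simp
        rw [e1, e2, e3,
            show max pA (q0 - 1) = q0 + 1 by omega, show min pB (q0 + 1) = q0 + 1 by omega,
            ascM_cons _ _ _ _ (by omega), ascM_nil _ _ _ _ (by omega)]
      · have e3 : sstep1 m3 N r c ([], [], []) = ([], [], []) := by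
          rw [sstep1_eq m3 N r c _ _ _ _ hc3, G.check,
              decide_eq_false (fun hp => b3 ⟨hp.2.2.1, hp.2.2.2⟩)]
          simp
        rw [e1, e2, e3, ascM_nil _ _ _ _ (by omega)]

theorem bfs_eq_spec {mk : Int → Int → Int × Int} {m1 m2 m3 : Int × Int} {s pA pB N : Int}
    (G : Geom mk m1 m2 m3 s pA pB N) (p0 q0 r c : Int)
    (hstart : mk p0 q0 = (r, c)) (hw : (pB + 1 - pA).toNat = N.toNat) :
    ∀ fb : Nat, N.toNat + 1 ≤ fb →
      bfsAll [m1, m2, m3] N r c = specGo mk s pA pB N p0 q0 fb 1 [] := by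
  intro fb hfb
  obtain ⟨fb', rfl⟩ : ∃ f, fb = f + 1 := ⟨fb - 1, by omega⟩
  rw [bfsAll_expand]
  simp only [specGo, show (p0 + s * 1 : Int) = p0 + s by ring]
  by_cases hP : 0 ≤ p0 + s ∧ p0 + s < N
  · rw [seeds_eq G p0 q0 r c hstart hP]
    by_cases hlh : max pA (q0 - 1) ≤ min pB (q0 + 1)
    · rw [if_pos ⟨hP.1, hP.2, hlh⟩]
      have hrl : rlv s N (p0 + s) ≤ N.toNat := by
        rcases G.s_unit with h | h <;> subst h <;> simp [rlv] <;> omega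
      have hdeep : ∀ j y, 1 ≤ j →
          mk (p0 + s + s * j) y ∉ ascM mk (p0 + s) (max pA (q0 - 1)) (min pB (q0 + 1)) := by
        intro j y hj h
        obtain ⟨y', _, _, he⟩ := (mem_ascM _ _ _ _ _).1 h
        have := (G.inj _ _ _ _ he).1
        rcases G.s_unit with hsv | hsv <;> subst hsv <;> omega
      have hfa : rlv s N (p0 + s) * (pB + 1 - pA).toNat + (pB + 1 - pA).toNat + 1
          ≤ N.toNat * N.toNat + N.toNat + 1 := by
        have := Nat.mul_le_mul_right (pB + 1 - pA).toNat hrl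
        rw [hw] at this ⊢
        omega
      have hmain := fan_run G p0 q0 fb' (N.toNat * N.toNat + N.toNat + 1) 1
        (ascM mk (p0 + s) (max pA (q0 - 1)) (min pB (q0 + 1)))
        (ascM mk (p0 + s) (max pA (q0 - 1)) (min pB (q0 + 1)))
        le_rfl (by rw [mul_one]; exact hP.1) (by rw [mul_one]; exact hP.2)
        hlh (by intro j y hj; rw [mul_one]; exact hdeep j y hj)
        (by rw [mul_one]; exact hfa) (by rw [mul_one]; exact le_trans hrl (by omega))
      rw [mul_one] at hmain
      rw [List.nil_append]
      exact hmain
    · rw [if_neg (fun hc => hlh hc.2.2)]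
      rw [ascM_nil _ _ _ _ (by omega)]
      rfl
  · have hc1 := G.ch1 p0 q0; rw [hstart] at hc1
    have hc2 := G.ch2 p0 q0; rw [hstart] at hc2
    have hc3 := G.ch3 p0 q0; rw [hstart] at hc3
    have e1 : sstep1 m1 N r c ([], [], []) = ([], [], []) := by
      rw [sstep1_eq m1 N r c _ _ _ _ hc1, G.check, decide_eq_false (fun hp => hP ⟨hp.1, hp.2.1⟩)]
      simp
    have e2 : sstep1 m2 N r c ([], [], []) = ([], [], []) := by
      rw [sstep1_eq m2 N r c _ _ _ _ hc2, G.check, decide_eq_false (fun hp => hP ⟨hp.1, hp.2.1⟩)]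
      simp
    have e3 : sstep1 m3 N r c ([], [], []) = ([], [], []) := by
      rw [sstep1_eq m3 N r c _ _ _ _ hc3, G.check, decide_eq_false (fun hp => hP ⟨hp.1, hp.2.1⟩)]
      simp
    rw [e1, e2, e3, if_neg (fun hc => hP ⟨hc.1, hc.2.1⟩)]
    rfl

theorem geom_ud (s N : Int) (hs : s = 1 ∨ s = -1) :
    Geom (fun p q => (p, q)) (s, -1) (s, 0) (s, 1) s 0 (N - 1) N := by
  refine ⟨?_, ?_, ?_, ?_, ?_, hs⟩
  · intro p q p' q' h
    exact ⟨congrArg Prod.fst h, congrArg Prod.snd h⟩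
  · intro p q
    simp only [check_B]
    split_ifs with h
    · exact (decide_eq_true (by omega)).symm
    · exact (decide_eq_false (by omega)).symm
  · intro p q; simp [Prod.ext_iff]; omega
  · intro p q; simp
  · intro p q; simp

theorem geom_lr (s N : Int) (hs : s = 1 ∨ s = -1) :
    Geom (fun p q => (-q, p)) (1, s) (0, s) (-1, s) s (1 - N) 0 N := by
  refine ⟨?_, ?_, ?_, ?_, ?_, hs⟩
  · intro p q p' q' h
    have h1 : -q = -q' := congrArg Prod.fst h
    have h2 : p = p' := congrArg Prod.snd h
    exact ⟨h2, by omega⟩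
  · intro p q
    simp only [check_B]
    split_ifs with h
    · exact (decide_eq_true (by omega)).symm
    · exact (decide_eq_false (by omega)).symm
  · intro p q; simp [Prod.ext_iff]; omega
  · intro p q; simp
  · intro p q; simp [Prod.ext_iff]; omega

theorem specGo_ud (s N r c : Int) :
    ∀ (fuel : Nat) (d : Int) (out : List (Int × Int)),
      specGo (fun p q => (p, q)) s 0 (N - 1) N r c fuel d out = fanGo s 0 N r c fuel d out := by
  intro fuel
  induction fuel with
  | zero => intro d out; rfl
  | succ fuel ih =>
      intro d out
      simp only [specGo, fanGo, ascM, ih]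
      rfl

theorem negMap (P : Int) : ∀ (k : Nat) (lo hi : Int), (hi + 1 - lo).toNat = k →
    (PySem.List.pyRange lo (hi + 1) 1).map (fun q => ((-q : Int), P))
      = (PySem.List.pyRange (-lo) (-hi - 1) (-1)).map (fun row => (row, P)) := by
  intro k
  induction k with
  | zero =>
      intro lo hi h
      rw [PySem.List.pyRange_one_eq_nil (by omega), PySem.List.pyRange_neg_one_eq_nil (by omega)]
      rfl
  | succ k ih =>
      intro lo hi h
      rw [PySem.List.pyRange_one_cons (by omega), PySem.List.pyRange_neg_one_cons (by omega)]
      simp only [List.map_cons]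
      have := ih (lo + 1) hi (by omega)
      rw [show (-(lo + 1) : Int) = -lo - 1 by ring] at this
      rw [this]

theorem specGo_lr (s N r c : Int) (hs : s = 1 ∨ s = -1) :
    ∀ (fuel : Nat) (d : Int) (out : List (Int × Int)),
      specGo (fun p q => (-q, p)) s (1 - N) 0 N c (-r) fuel d out = fanGo 0 s N r c fuel d out := by
  have hs0 : (s == 0) = false := by rcases hs with h | h <;> subst h <;> rfl
  intro fuel
  induction fuel with
  | zero => intro d out; rfl
  | succ fuel ih =>
      intro d out
      simp only [specGo, fanGo, ascM, hs0, Bool.false_eq_true, if_false]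
      by_cases h : 0 ≤ c + s * d ∧ c + s * d < N ∧ max 0 (r - d) ≤ min (N - 1) (r + d)
      · rw [if_pos (⟨h.1, h.2.1, by have := h.2.2; omega⟩ :
              0 ≤ c + s * d ∧ c + s * d < N ∧ max (1 - N) (-r - d) ≤ min 0 (-r + d)),
            if_pos h, ih]
        congr 2
        have e1 : (-(max (1 - N) (-r - d)) : Int) = min (N - 1) (r + d) := by omega
        have e2 : (-(min 0 (-r + d)) - 1 : Int) = max 0 (r - d) - 1 := by omega
        rw [negMap (c + s * d) (min 0 (-r + d) + 1 - max (1 - N) (-r - d)).toNat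
              (max (1 - N) (-r - d)) (min 0 (-r + d)) rfl]
        rw [e1, e2]
      · rw [if_neg (fun hc => h ⟨hc.1, hc.2.1, by have := hc.2.2; omega⟩), if_neg h]

-- ===== VERDICT (by name: the statement is the Claim_ definition above) =====
theorem make_first_seen_spec : Claim_equal_make_first_seen := by
  unfold Claim_equal_make_first_seen
  intro sd N r c _ hpre
  unfold Spec_make_first_seen
  obtain ⟨hl, hh⟩ := hpre
  interval_cases sd
  · rw [show make_first_seen (-4) N r c = bfsAll [((-1:Int),(-1:Int)),(-1,0),(-1,1)] N r c from rfl,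
        show make_first_seen_alt (-4) N r c = fanGo (-1) 0 N r c (N.toNat + r.natAbs + c.natAbs + 2) 1 [] from rfl,
        ← specGo_ud (-1) N r c]
    exact bfs_eq_spec (geom_ud (-1) N (Or.inr rfl)) r c r c rfl (by omega) _ (by omega)
  · rw [show make_first_seen (-3) N r c = bfsAll [((1:Int),(-1:Int)),(1,0),(1,1)] N r c from rfl,
        show make_first_seen_alt (-3) N r c = fanGo 1 0 N r c (N.toNat + r.natAbs + c.natAbs + 2) 1 [] from rfl,
        ← specGo_ud 1 N r c]
    exact bfs_eq_spec (geom_ud 1 N (Or.inl rfl)) r c r c rfl (by omega) _ (by omega)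
  · rw [show make_first_seen (-2) N r c = bfsAll [((1:Int),(-1:Int)),(0,-1),(-1,-1)] N r c from rfl,
        show make_first_seen_alt (-2) N r c = fanGo 0 (-1) N r c (N.toNat + r.natAbs + c.natAbs + 2) 1 [] from rfl,
        ← specGo_lr (-1) N r c (Or.inr rfl)]
    exact bfs_eq_spec (geom_lr (-1) N (Or.inr rfl)) c (-r) r c (by simp) (by omega) _ (by omega)
  · rw [show make_first_seen (-1) N r c = bfsAll [((1:Int),(1:Int)),(0,1),(-1,1)] N r c from rfl,
        show make_first_seen_alt (-1) N r c = fanGo 0 1 N r c (N.toNat + r.natAbs + c.natAbs + 2) 1 [] from rfl,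
        ← specGo_lr 1 N r c (Or.inl rfl)]
    exact bfs_eq_spec (geom_lr 1 N (Or.inl rfl)) c (-r) r c (by simp) (by omega) _ (by omega)
  · rw [show make_first_seen 0 N r c = bfsAll [((-1:Int),(-1:Int)),(-1,0),(-1,1)] N r c from rfl,
        show make_first_seen_alt 0 N r c = fanGo (-1) 0 N r c (N.toNat + r.natAbs + c.natAbs + 2) 1 [] from rfl,
        ← specGo_ud (-1) N r c]
    exact bfs_eq_spec (geom_ud (-1) N (Or.inr rfl)) r c r c rfl (by omega) _ (by omega)
  · rw [show make_first_seen 1 N r c = bfsAll [((1:Int),(-1:Int)),(1,0),(1,1)] N r c from rfl,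
        show make_first_seen_alt 1 N r c = fanGo 1 0 N r c (N.toNat + r.natAbs + c.natAbs + 2) 1 [] from rfl,
        ← specGo_ud 1 N r c]
    exact bfs_eq_spec (geom_ud 1 N (Or.inl rfl)) r c r c rfl (by omega) _ (by omega)
  · rw [show make_first_seen 2 N r c = bfsAll [((1:Int),(-1:Int)),(0,-1),(-1,-1)] N r c from rfl,
        show make_first_seen_alt 2 N r c = fanGo 0 (-1) N r c (N.toNat + r.natAbs + c.natAbs + 2) 1 [] from rfl,
        ← specGo_lr (-1) N r c (Or.inr rfl)]
    exact bfs_eq_spec (geom_lr (-1) N (Or.inr rfl)) c (-r) r c (by simp) (by omega) _ (by omega)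
  · rw [show make_first_seen 3 N r c = bfsAll [((1:Int),(1:Int)),(0,1),(-1,1)] N r c from rfl,
        show make_first_seen_alt 3 N r c = fanGo 0 1 N r c (N.toNat + r.natAbs + c.natAbs + 2) 1 [] from rfl,
        ← specGo_lr 1 N r c (Or.inl rfl)]
    exact bfs_eq_spec (geom_lr 1 N (Or.inl rfl)) c (-r) r c (by simp) (by omega) _ (by omega)
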